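-- pv_equiv track=rewrite | github.com/SaadiMohamed/Python-Development | labo4/oefn12.py | checkAnnagram
-- ===== SOURCE A (Python) =====
-- def checkAnnagram(woord1,woord2):
--     letters1 = {}
--     letters2 = {}
--     for i in woord1:
--         if i in letters1.keys():
--             letters1[i] = letters1[i] +1
--         else:
--             letters1[i] = 1
--
--     for i in woord2:
--         if i in letters2.keys():
--             letters2[i] = letters2[i] +1
--         else:
--             letters2[i] = 1
--
--     if len(letters1) != len(letters2):
--         return False
--
--     for key,value in letters1.items():
--         if key in letters2.keys():
--             if letters1[key] != letters2[key]:
--                 return False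
--         else:
--             return False
--     return True
-- ===== SOURCE B (Python) =====
-- def checkAnnagram(woord1, woord2):
--     return sorted(woord1) == sorted(woord2)
-- ===== Notes on version B (the rewrite author's own statement) =====
-- stated objective: simpler
-- what changed: Replaces the two dict-based frequency-counting loops plus the size/key comparison loop with a one-line sort-and-compare of the two character sequences.
import Mathlib
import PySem

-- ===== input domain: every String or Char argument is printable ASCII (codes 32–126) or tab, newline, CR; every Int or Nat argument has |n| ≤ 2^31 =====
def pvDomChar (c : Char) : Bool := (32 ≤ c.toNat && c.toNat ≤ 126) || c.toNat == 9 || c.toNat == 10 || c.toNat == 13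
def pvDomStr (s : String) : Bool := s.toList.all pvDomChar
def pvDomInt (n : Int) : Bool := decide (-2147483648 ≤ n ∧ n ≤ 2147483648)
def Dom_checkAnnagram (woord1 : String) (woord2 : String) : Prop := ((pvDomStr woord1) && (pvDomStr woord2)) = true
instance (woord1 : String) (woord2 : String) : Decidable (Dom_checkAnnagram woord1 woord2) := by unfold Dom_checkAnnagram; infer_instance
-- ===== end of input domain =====

-- B replaces A's two dict-counting loops and comparison loop by sort-and-compare (objective: simpler).

-- ===== PORT A =====
-- the counting loop: 'if i in letters: letters[i] += 1 else: letters[i] = 1'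
def countLoop (w : List Char) : PySem.Dict Char Int :=
  w.foldl (fun d i => if d.contains i then d.insert i (d.getD i 0 + 1) else d.insert i 1)
    PySem.Dict.empty

def checkAnnagram (woord1 : String) (woord2 : String) : Bool :=
  let letters1 := countLoop woord1.toList
  let letters2 := countLoop woord2.toList
  if letters1.size ≠ letters2.size then false
  else
    -- the for-loop over letters1.items() with early 'return False' = List.all
    -- (letters1[key]/letters2[key] read via getD: the contains checks guarantee the key is present)
    letters1.items.all (fun p =>
      if letters2.contains p.1 then letters1.getD p.1 0 == letters2.getD p.1 0 else false)

-- ===== PORT B =====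
def checkAnnagram_alt (woord1 : String) (woord2 : String) : Bool :=
  PySem.List.sorted woord1.toList (fun x => x) false
    == PySem.List.sorted woord2.toList (fun x => x) false

-- ===== PRECONDITION & SPEC =====
def Spec_checkAnnagram (woord1 : String) (woord2 : String) (out : Bool) : Prop := out = checkAnnagram_alt woord1 woord2
instance (woord1 : String) (woord2 : String) (out : Bool) : Decidable (Spec_checkAnnagram woord1 woord2 out) := by unfold Spec_checkAnnagram; infer_instance

-- ===== CLAIM (what is proved, stated in full; the proofs are below) =====
def Claim_equal_checkAnnagram : Prop := ∀ (woord1 : String) (woord2 : String), Dom_checkAnnagram woord1 woord2 → Spec_checkAnnagram woord1 woord2 (checkAnnagram woord1 woord2)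

-- ===== LEMMAS AND PROOFS =====

-- A's counting loop is Counter(w): the else-branch inserts 1 = getD + 1 when the key is absent
lemma countLoop_eq_counter (w : List Char) : countLoop w = PySem.Dict.counter w := by
  unfold countLoop
  rw [← PySem.Dict.foldl_insert_getD_add_one_eq_counter]
  congr 1
  funext d i
  cases hc : d.contains i with
  | true => simp
  | false => rw [if_neg (by exact Bool.false_ne_true), PySem.Dict.getD_of_not_contains d 0 hc]; norm_num

-- A returns true iff the two words are permutations of each other
lemma checkAnnagram_eq_true_iff (w1 w2 : String) :
    checkAnnagram w1 w2 = true ↔ w1.toList.Perm w2.toList := by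
  unfold checkAnnagram
  rw [countLoop_eq_counter, countLoop_eq_counter]
  set l1 := w1.toList with hl1
  set l2 := w2.toList with hl2
  show (if (PySem.Dict.counter l1).size ≠ (PySem.Dict.counter l2).size then false
    else (PySem.Dict.counter l1).items.all (fun p =>
      if (PySem.Dict.counter l2).contains p.1 then
        (PySem.Dict.counter l1).getD p.1 0 == (PySem.Dict.counter l2).getD p.1 0
      else false)) = true ↔ l1.Perm l2
  constructor
  · intro h
    split_ifs at h with hsz
    rw [List.perm_iff_count]
    have hall := List.all_eq_true.mp h
    -- counts agree on every member of l1
    have hcnt : ∀ c ∈ l1, l1.count c = l2.count c := by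
      intro c hc
      have hmem : (c, (l1.count c : Int)) ∈ (PySem.Dict.counter l1).items := by
        rw [PySem.Dict.items_counter]
        exact List.mem_map.mpr ⟨c, by simp [PySem.Set.mem_ofList, hc]⟩
      have hx := hall _ hmem
      by_cases h2 : c ∈ l2
      · simp [PySem.Dict.contains_counter, h2, PySem.Dict.getD_counter] at hx
        exact_mod_cast hx
      · simp [PySem.Dict.contains_counter, h2] at hx
    -- keys of counter l1 are among keys of counter l2, and the sizes agree
    have hsub : (PySem.Set.ofList l1 : List Char) ⊆ PySem.Set.ofList l2 := by
      intro c hc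
      rw [PySem.Set.mem_ofList] at hc ⊢
      have hpos : 0 < l2.count c := by
        rw [← hcnt c hc]; exact List.count_pos_iff.mpr hc
      exact List.count_pos_iff.mp hpos
    have hlen : (PySem.Set.ofList l2 : List Char).length ≤ (PySem.Set.ofList l1 : List Char).length := by
      have hsz' : (PySem.Dict.counter l1).size = (PySem.Dict.counter l2).size := by
        by_contra hne; exact hsz hne
      simpa [PySem.Dict.size, PySem.Dict.items_counter] using hsz'.ge
    have hperm : (PySem.Set.ofList l1 : List Char).Perm (PySem.Set.ofList l2) :=
      (List.subperm_of_subset (PySem.Set.nodup_ofList l1) hsub).perm_of_length_le hlen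
    intro c
    by_cases hc : c ∈ l1
    · exact hcnt c hc
    · have hc2 : c ∉ l2 := by
        intro h2
        exact hc ((PySem.Set.mem_ofList l1 c).mp
          (hperm.mem_iff.mpr ((PySem.Set.mem_ofList l2 c).mpr h2)))
      simp [List.count_eq_zero_of_not_mem hc, List.count_eq_zero_of_not_mem hc2]
  · intro hp
    have hcnt := List.perm_iff_count.mp hp
    have hset : (PySem.Set.ofList l1 : List Char).Perm (PySem.Set.ofList l2) := by
      rw [List.perm_ext_iff_of_nodup (PySem.Set.nodup_ofList l1) (PySem.Set.nodup_ofList l2)]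
      intro c
      rw [PySem.Set.mem_ofList, PySem.Set.mem_ofList]
      exact hp.mem_iff
    rw [if_neg (by simp [PySem.Dict.size, PySem.Dict.items_counter, hset.length_eq])]
    rw [List.all_eq_true]
    intro p hpmem
    rw [PySem.Dict.items_counter] at hpmem
    obtain ⟨c, hc, rfl⟩ := List.mem_map.mp hpmem
    have hc1 : c ∈ l1 := (PySem.Set.mem_ofList l1 c).mp hc
    have hc2 : c ∈ l2 := hp.mem_iff.mp hc1
    simp [PySem.Dict.contains_counter, hc2, PySem.Dict.getD_counter, hcnt c]

-- B returns true iff the two words are permutations of each other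
lemma checkAnnagram_alt_eq_true_iff (w1 w2 : String) :
    checkAnnagram_alt w1 w2 = true ↔ w1.toList.Perm w2.toList := by
  unfold checkAnnagram_alt
  rw [beq_iff_eq, PySem.List.sorted_id_eq_sorted_id_iff_perm]

-- ===== VERDICT (by name: the statement is the Claim_ definition above) =====
theorem checkAnnagram_spec : Claim_equal_checkAnnagram := by
  intro w1 w2 _
  unfold Spec_checkAnnagram
  rw [Bool.eq_iff_iff, checkAnnagram_eq_true_iff, checkAnnagram_alt_eq_true_iff]
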